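-- pv_equiv track=rewrite | github.com/bdenckla/MAM-basics | py/pympp/mpp_slh_words.py | _my_partition
-- ===== SOURCE A (Python) =====
-- def _my_partition(string):
--     seps = " =<>,;:"
--     partitions = [string.partition(sep) for sep in seps]
--     shortest_partition = partitions[0]
--     for partition in partitions[1:]:
--         if len(partition[0]) < len(shortest_partition[0]):
--             shortest_partition = partition
--     if shortest_partition[0] == string:
--         return None
--     return shortest_partition
-- ===== SOURCE B (Python) =====
-- def _my_partition(string):
--     seps = " =<>,;:"
--     for i, ch in enumerate(string):
--         if ch in seps:
--             return string[:i], ch, string[i + 1:]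
--     return None
-- ===== Notes on version B (the rewrite author's own statement) =====
-- stated objective: idiomatic
-- what changed: B replaces A's seven str.partition calls plus a min-prefix-length selection loop with a single enumerate scan that returns at the first separator character.
import Mathlib
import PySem

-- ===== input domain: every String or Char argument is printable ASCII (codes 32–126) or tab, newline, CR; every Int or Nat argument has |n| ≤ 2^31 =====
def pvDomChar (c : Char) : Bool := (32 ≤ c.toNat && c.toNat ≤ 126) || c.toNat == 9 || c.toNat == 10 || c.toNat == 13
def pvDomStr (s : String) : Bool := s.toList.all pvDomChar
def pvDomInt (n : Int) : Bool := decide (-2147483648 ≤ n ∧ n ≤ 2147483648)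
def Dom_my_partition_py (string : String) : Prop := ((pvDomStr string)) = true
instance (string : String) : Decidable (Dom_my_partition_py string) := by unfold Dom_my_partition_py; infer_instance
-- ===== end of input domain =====

-- B replaces A's seven str.partition calls and min-prefix selection by a single
-- left-to-right scan stopping at the first separator character (idiomatic one-pass).


-- ===== PORT A =====
-- seps = " =<>,;:" as a list of characters (iterating a Python str yields its chars)
def pvSeps : List Char := [' ', '=', '<', '>', ',', ';', ':']

-- string.partition(sep) for a single-character sep, over the char list (exact)
def pvPartChar (l : List Char) (c : Char) : List Char × List Char × List Char :=
  match l with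
  | [] => ([], [], [])
  | x :: xs =>
    if x = c then ([], [c], xs)
    else
      let t := pvPartChar xs c
      (x :: t.1, t.2.1, t.2.2)

-- the loop body: keep the partition with the strictly shorter first component
def pvPick (s p : List Char × List Char × List Char) : List Char × List Char × List Char :=
  if p.1.length < s.1.length then p else s

def my_partition_py (string : String) : Option (String × String × String) :=
  let l := string.toList
  let partitions := pvSeps.map (pvPartChar l)
  let shortest := partitions.tail.foldl pvPick partitions.headI
  if shortest.1 = l then none
  else some (String.ofList shortest.1, String.ofList shortest.2.1, String.ofList shortest.2.2)

-- ===== PORT B =====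
-- scan left to right; at the first separator return (prefix, that char, rest)
def pvScan : List Char → Option (List Char × List Char × List Char)
  | [] => none
  | x :: xs =>
    if pvSeps.contains x then some ([], [x], xs)
    else (pvScan xs).map (fun t => (x :: t.1, t.2.1, t.2.2))

def my_partition_py_alt (string : String) : Option (String × String × String) :=
  (pvScan string.toList).map (fun t => (String.ofList t.1, String.ofList t.2.1, String.ofList t.2.2))

-- ===== PRECONDITION & SPEC =====
def Spec_my_partition_py (string : String) (out : Option (String × String × String)) : Prop := out = my_partition_py_alt string
instance (string : String) (out : Option (String × String × String)) : Decidable (Spec_my_partition_py string out) := by unfold Spec_my_partition_py; infer_instance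

-- ===== CLAIM (what is proved, stated in full; the proofs are below) =====
def Claim_equal_my_partition_py : Prop := ∀ (string : String), Dom_my_partition_py string → Spec_my_partition_py string (my_partition_py string)

-- ===== LEMMAS AND PROOFS =====

def pvConsF (x : Char) (t : List Char × List Char × List Char) :
    List Char × List Char × List Char := (x :: t.1, t.2.1, t.2.2)

lemma pick_consF (x : Char) (s p : List Char × List Char × List Char) :
    pvPick (pvConsF x s) (pvConsF x p) = pvConsF x (pvPick s p) := by
  simp only [pvPick, pvConsF, List.length_cons]
  split_ifs with h1 h2 h2 <;> first | rfl | omega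

lemma partChar_cons_eq (x : Char) (xs : List Char) :
    pvPartChar (x :: xs) x = ([], [x], xs) := by
  simp [pvPartChar]

lemma pick_consF_zero (x : Char) (s : List Char × List Char × List Char)
    (m r : List Char) : pvPick (pvConsF x s) ([], m, r) = ([], m, r) := by
  simp [pvPick, pvConsF]

lemma pick_zero (m r : List Char) (p : List Char × List Char × List Char) :
    pvPick ([], m, r) p = ([], m, r) := by
  simp [pvPick]

lemma partChar_cons_ne (x c : Char) (xs : List Char) (h : x ≠ c) :
    pvPartChar (x :: xs) c = pvConsF x (pvPartChar xs c) := by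
  simp [pvPartChar, h, pvConsF]

lemma scan_length {l : List Char} {t : List Char × List Char × List Char}
    (h : pvScan l = some t) : t.1.length < l.length := by
  induction l generalizing t with
  | nil => simp [pvScan] at h
  | cons x xs ih =>
    simp only [pvScan] at h
    split_ifs at h with hx
    · cases h; simp
    · cases hscan : pvScan xs with
      | none => rw [hscan] at h; simp at h
      | some u =>
        rw [hscan] at h
        simp only [Option.map_some] at h
        cases h
        have := ih hscan
        simp; omega

lemma sel_eq (l : List Char) :
    ((pvSeps.map (pvPartChar l)).tail).foldl pvPick ((pvSeps.map (pvPartChar l)).headI)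
      = (match pvScan l with | none => (l, ([] : List Char), ([] : List Char)) | some t => t) := by
  induction l with
  | nil => decide
  | cons x xs ih =>
    by_cases hx : x ∈ pvSeps
    · have hx' : x = ' ' ∨ x = '=' ∨ x = '<' ∨ x = '>' ∨ x = ',' ∨ x = ';' ∨ x = ':' := by
        simpa [pvSeps] using hx
      have hscan : pvScan (x :: xs) = some ([], [x], xs) := by
        simp [pvScan, hx]
      rw [hscan]
      rcases hx' with h | h | h | h | h | h | h <;> subst h <;>
        simp [pvSeps, List.foldl, partChar_cons_eq, partChar_cons_ne,
          pick_consF, pick_consF_zero, pick_zero]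
    · have hne : x ≠ ' ' ∧ x ≠ '=' ∧ x ≠ '<' ∧ x ≠ '>' ∧ x ≠ ',' ∧ x ≠ ';' ∧ x ≠ ':' := by
        simpa [pvSeps] using hx
      obtain ⟨h1, h2, h3, h4, h5, h6, h7⟩ := hne
      have hmap : pvSeps.map (pvPartChar (x :: xs))
          = (pvSeps.map (pvPartChar xs)).map (pvConsF x) := by
        simp [pvSeps, partChar_cons_ne, h1, h2, h3, h4, h5, h6, h7]
      rw [hmap]
      have hscan : pvScan (x :: xs) = (pvScan xs).map (pvConsF x) := by
        simp [pvScan, hx]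
        rfl
      rw [hscan]
      have hfold :
          ((pvSeps.map (pvPartChar xs)).map (pvConsF x)).tail.foldl pvPick
              ((pvSeps.map (pvPartChar xs)).map (pvConsF x)).headI
            = pvConsF x (((pvSeps.map (pvPartChar xs)).tail).foldl pvPick
                ((pvSeps.map (pvPartChar xs)).headI)) := by
        simp only [pvSeps, List.map, List.tail, List.headI, List.foldl, pick_consF]
      rw [hfold, ih]
      cases pvScan xs <;> simp [pvConsF]

-- ===== VERDICT (by name: the statement is the Claim_ definition above) =====
theorem my_partition_py_spec : Claim_equal_my_partition_py := by
  intro s _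
  simp only [Spec_my_partition_py, my_partition_py, my_partition_py_alt]
  rw [sel_eq]
  cases hscan : pvScan s.toList with
  | none => simp
  | some t =>
    have hlt := scan_length hscan
    have hne : t.1 ≠ s.toList := by
      intro h; rw [h] at hlt; omega
    simp [hne]
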